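-- pv_equiv track=rewrite | github.com/TheHaya/AuD-Python | Backtracking/Uebung10.py | minWeg
-- ===== SOURCE A (Python) =====
-- def minWeg(route):
--     minimum = len(route[0])
--     short = route[0]
--     for i in range(1, len(route)):
--         if (len(route[i]) < minimum):
--             minimum = len(route[i])
--             short = route[i]
--     return short
-- ===== SOURCE B (Python) =====
-- def minWeg(route):
--     return sorted(route, key=len)[0]
-- ===== Notes on version B (the rewrite author's own statement) =====
-- stated objective: idiomatic
-- what changed: Replaces the explicit min-tracking loop with a stable sort by length followed by taking the first element (stable sort preserves first-shortest tie-breaking).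
import Mathlib
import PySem

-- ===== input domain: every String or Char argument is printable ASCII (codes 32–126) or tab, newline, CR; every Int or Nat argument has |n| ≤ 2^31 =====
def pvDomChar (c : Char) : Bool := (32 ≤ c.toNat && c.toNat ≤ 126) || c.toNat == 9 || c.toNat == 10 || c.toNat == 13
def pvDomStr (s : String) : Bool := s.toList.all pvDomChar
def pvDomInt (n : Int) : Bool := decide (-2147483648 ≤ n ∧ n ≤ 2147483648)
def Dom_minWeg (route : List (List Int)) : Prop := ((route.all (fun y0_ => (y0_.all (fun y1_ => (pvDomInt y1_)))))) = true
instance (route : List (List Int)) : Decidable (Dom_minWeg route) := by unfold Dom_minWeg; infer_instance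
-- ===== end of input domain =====

-- B replaces A's explicit min-tracking loop with a stable sort by length followed by taking the
-- first element (idiomatic; same tie-breaking because the sort is stable and A's comparison is strict).

-- ===== PORT A =====
def minWeg (route : List (List Int)) : List Int :=
  match PySem.List.pyGet? route 0 with
  | none => []                        -- route[0] raises IndexError on []; excluded by Pre_
  | some first =>
    ((PySem.List.pyRange 1 (route.length : Int) 1).foldl
      (fun (s : Int × List Int) i =>
        let r := PySem.List.pyGetD route i []
        if (r.length : Int) < s.1 then ((r.length : Int), r) else s)
      ((first.length : Int), first)).2

-- ===== PORT B =====
def minWeg_alt (route : List (List Int)) : List Int :=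
  match PySem.List.pyGet? (PySem.List.sorted route (fun l => l.length) false) 0 with
  | none => []                        -- sorted([])[0] raises IndexError on []; excluded by Pre_
  | some s => s

-- ===== PRECONDITION & SPEC =====
-- Pre_ excludes exactly the empty list, on which both Pythons raise IndexError.
def Pre_minWeg (route : List (List Int)) : Prop := route ≠ []
instance (route : List (List Int)) : Decidable (Pre_minWeg route) := by unfold Pre_minWeg; infer_instance
def pvWitness_minWeg : List (List Int) := [[1, 2], [3]]

def Spec_minWeg (route : List (List Int)) (out : List Int) : Prop := out = minWeg_alt route
instance (route : List (List Int)) (out : List Int) : Decidable (Spec_minWeg route out) := by unfold Spec_minWeg; infer_instance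

-- ===== CLAIM (what is proved, stated in full; the proofs are below) =====
def Claim_equal_minWeg : Prop := ∀ (route : List (List Int)), Dom_minWeg route → Pre_minWeg route → Spec_minWeg route (minWeg route)

-- ===== LEMMAS AND PROOFS =====

-- the min-tracking fold over the tail, carrying only the current shortest element
def minfold (x : List Int) (t : List (List Int)) : List Int :=
  t.foldl (fun s r => if r.length < s.length then r else s) x

lemma minfold_cons (x r : List Int) (t : List (List Int)) :
    minfold x (r :: t) = minfold (if r.length < x.length then r else x) t := rfl

-- A's fold with the (Int length, element) state projects to minfold
lemma a_fold_eq_minfold (t : List (List Int)) (s : Int × List Int)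
    (hs : s.1 = (s.2.length : Int)) :
    (t.foldl (fun (s : Int × List Int) r =>
        if (r.length : Int) < s.1 then ((r.length : Int), r) else s) s).2
      = minfold s.2 t := by
  induction t generalizing s with
  | nil => simp [minfold]
  | cons r t ih =>
    simp only [List.foldl_cons, minfold_cons]
    by_cases h : r.length < s.2.length
    · rw [if_pos (by omega : (r.length : Int) < s.1), if_pos h]
      exact ih _ rfl
    · rw [if_neg (by omega : ¬ (r.length : Int) < s.1), if_neg h]
      exact ih _ hs

-- head of the insertion-sort accumulator evolves exactly like A's strict-< min tracking
lemma foldl_insertBy_head (t : List (List Int)) (h : List Int) (acc : List (List Int)) :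
    ∃ rest, t.foldl
        (fun acc x => PySem.List.insertBy
          (fun a b => decide ((fun l : List Int => l.length) a < (fun l : List Int => l.length) b)) x acc)
        (h :: acc)
      = minfold h t :: rest := by
  induction t generalizing h acc with
  | nil => exact ⟨acc, rfl⟩
  | cons r t ih =>
    simp only [List.foldl_cons, PySem.List.insertBy, minfold_cons]
    by_cases hr : r.length < h.length
    · simp only [hr, decide_true, if_true]
      exact ih r (h :: acc)
    · simp only [hr, decide_false, if_false]
      exact ih h _

lemma sorted_head (x : List Int) (t : List (List Int)) :
    ∃ rest, PySem.List.sorted (x :: t) (fun l : List Int => l.length) false = minfold x t :: rest := by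
  have := foldl_insertBy_head t x []
  simpa [PySem.List.sorted, PySem.List.insertBy] using this

lemma fold_range_drop (route : List (List Int)) :
    ∀ (n k : Nat) (s : Int × List Int), route.length - k = n →
    (PySem.List.pyRange (k : Int) (route.length : Int) 1).foldl
      (fun (s : Int × List Int) i =>
        let r := PySem.List.pyGetD route i []
        if (r.length : Int) < s.1 then ((r.length : Int), r) else s) s
    = (route.drop k).foldl
      (fun (s : Int × List Int) r =>
        if (r.length : Int) < s.1 then ((r.length : Int), r) else s) s := by
  intro n
  induction n with
  | zero =>
    intro k s hk
    rw [PySem.List.pyRange_one_eq_nil (by exact_mod_cast (by omega : route.length ≤ k)),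
        List.drop_of_length_le (by omega)]
    rfl
  | succ n ih =>
    intro k s hk
    have hlt : k < route.length := by omega
    rw [PySem.List.pyRange_one_cons (by exact_mod_cast hlt), List.foldl_cons,
        List.drop_eq_getElem_cons hlt, List.foldl_cons]
    have hget : PySem.List.pyGetD route (k : Int) [] = route[k] := by
      rw [PySem.List.pyGetD_eq_getElem route [] (by positivity) (by exact_mod_cast hlt)]
      simp
    simp only [hget]
    rw [show ((k : Int) + 1) = ((k + 1 : Nat) : Int) by push_cast; ring]
    exact ih (k + 1) _ (by omega)

-- ===== VERDICT (by name: the statement is the Claim_ definition above) =====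
theorem minWeg_spec : Claim_equal_minWeg := by
  intro route _ hpre
  unfold Spec_minWeg minWeg minWeg_alt
  obtain ⟨x, t, rfl⟩ : ∃ x t, route = x :: t := by
    cases route with
    | nil => exact absurd rfl hpre
    | cons x t => exact ⟨x, t, rfl⟩
  obtain ⟨rest, hsort⟩ := sorted_head x t
  rw [hsort]
  simp only [PySem.List.pyGet?_zero_cons]
  have hfold := fold_range_drop (x :: t) t.length 1 ((x.length : Int), x) (by simp)
  rw [show ((1 : Nat) : Int) = (1 : Int) by norm_num] at hfold
  rw [hfold, List.drop_one, List.tail_cons]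
  rw [a_fold_eq_minfold t ((x.length : Int), x) rfl]
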